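-- pv_equiv track=rewrite | github.com/baolongsun/Jianzhioffer | huawei/最长密码.py | longestPD
-- ===== SOURCE A (Python) =====
-- def longestPD(input_str):
--     set_index = set()
--     for i in input_str:
--         set_index.add(i)
--     best_res = ''
--     for j in input_str:
--         if j[:-1] in set_index:
--             if len(j) > len(best_res):
--                 best_res = j
--     return best_res
-- ===== SOURCE B (Python) =====
-- def longestPD(input_str):
--     present = set(input_str)
--     for j in sorted(input_str, key=len, reverse=True):
--         if j[:-1] in present:
--             return j
--     return ''
-- ===== Notes on version B (the rewrite author's own statement) =====
-- stated objective: alternative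
-- what changed: replaces the single running-max scan with a sort-then-first-hit strategy: build the membership set once, stably sort the strings by length descending, and return the first whose one-char-shorter prefix is in the set
import Mathlib
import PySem

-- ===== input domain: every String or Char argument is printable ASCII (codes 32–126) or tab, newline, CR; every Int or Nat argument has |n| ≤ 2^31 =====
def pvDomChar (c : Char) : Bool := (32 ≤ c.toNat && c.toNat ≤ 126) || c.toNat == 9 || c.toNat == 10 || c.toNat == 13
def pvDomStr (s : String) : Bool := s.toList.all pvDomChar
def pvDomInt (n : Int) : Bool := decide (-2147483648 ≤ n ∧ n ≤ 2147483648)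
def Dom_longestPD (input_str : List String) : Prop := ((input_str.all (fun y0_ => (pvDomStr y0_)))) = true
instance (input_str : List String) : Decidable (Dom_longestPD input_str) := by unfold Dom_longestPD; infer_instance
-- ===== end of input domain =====

-- B replaces A's running-max scan by a stable length-descending sort followed by the first hit: same value, a genuinely different traversal (objective: alternative).

-- ===== PORT A =====
def longestPD (input_str : List String) : String :=
  let set_index : PySem.Set String :=
    input_str.foldl (fun s i => PySem.Set.add s i) PySem.Set.empty
  input_str.foldl
    (fun best_res j =>
      if PySem.Set.contains set_index (PySem.Str.slice j none (some (-1))) then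
        if PySem.Str.len j > PySem.Str.len best_res then j else best_res
      else best_res) ""

-- ===== PORT B =====
def longestPD_alt (input_str : List String) : String :=
  let present : PySem.Set String := PySem.Set.ofList input_str
  match (PySem.List.sorted input_str (fun s => PySem.Str.len s) true).find?
      (fun j => PySem.Set.contains present (PySem.Str.slice j none (some (-1)))) with
  | some j => j
  | none => ""

-- ===== PRECONDITION & SPEC =====
def Spec_longestPD (input_str : List String) (out : String) : Prop := out = longestPD_alt input_str
instance (input_str : List String) (out : String) : Decidable (Spec_longestPD input_str out) := by unfold Spec_longestPD; infer_instance

-- ===== CLAIM (what is proved, stated in full; the proofs are below) =====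
def Claim_equal_longestPD : Prop := ∀ (input_str : List String), Dom_longestPD input_str → Spec_longestPD input_str (longestPD input_str)

-- ===== LEMMAS AND PROOFS =====

theorem pv_eq_empty_of_len_le_zero (s : String) (h : PySem.Str.len s ≤ 0) : s = "" := by
  rw [PySem.Str.len_eq] at h
  have hnil : s.toList = [] := by
    cases hl : s.toList with
    | nil => rfl
    | cons c cs => rw [hl] at h; simp at h; exact absurd h (by omega)
  have := congrArg String.ofList hnil
  simpa using this

-- inserting before everything is consing
theorem pv_insertBy_cons (bef : String → String → Bool) (x : String) (l : List String)
    (h : ∀ z ∈ l, bef x z = true) : PySem.List.insertBy bef x l = x :: l := by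
  cases l with
  | nil => rfl
  | cons y ys => simp [PySem.List.insertBy, h y (by simp)]

-- filter commutes with insertion into a length-descending list
theorem pv_filter_insertBy (P : String → Bool) (x : String) (ys : List String)
    (h : ys.Pairwise (fun a b => PySem.Str.len b ≤ PySem.Str.len a)) :
    (PySem.List.insertBy (fun a b => decide (PySem.Str.len b < PySem.Str.len a)) x ys).filter P
      = if P x then
          PySem.List.insertBy (fun a b => decide (PySem.Str.len b < PySem.Str.len a)) x (ys.filter P)
        else ys.filter P := by
  induction ys with
  | nil => cases hP : P x <;> simp [PySem.List.insertBy, hP]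
  | cons y ys ih =>
    have hpw := (List.pairwise_cons.mp h).2
    have hy := (List.pairwise_cons.mp h).1
    simp only [PySem.List.insertBy]
    by_cases hb : PySem.Str.len y < PySem.Str.len x
    · rw [if_pos (decide_eq_true hb)]
      cases hP : P x with
      | false => simp [List.filter_cons, hP]
      | true =>
        cases hPy : P y with
        | true =>
          simp only [List.filter_cons, hP, hPy, if_true, PySem.List.insertBy]
          rw [if_pos (decide_eq_true hb)]
        | false =>
          simp only [List.filter_cons, hP, hPy, if_true]
          rw [pv_insertBy_cons _ _ _ (by
            intro z hz
            have h1 : PySem.Str.len z ≤ PySem.Str.len y := hy z (List.mem_of_mem_filter hz)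
            simp only [decide_eq_true_eq]
            omega)]
    · rw [if_neg (by simpa using hb)]
      cases hP : P x with
      | false =>
        cases hPy : P y with
        | true => simp only [List.filter_cons, hPy, if_true]; rw [ih hpw]; simp [hP]
        | false => simp only [List.filter_cons, hPy]; rw [ih hpw]; simp [hP]
      | true =>
        cases hPy : P y with
        | true =>
          simp only [List.filter_cons, hPy, if_true]
          rw [ih hpw]
          simp only [hP, if_true, PySem.List.insertBy]
          rw [if_neg (by simpa using hb)]
        | false =>
          simp only [List.filter_cons, hPy]
          rw [ih hpw]
          simp [hP]

theorem pv_sorted_append_singleton (xs : List String) (x : String) :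
    PySem.List.sorted (xs ++ [x]) (fun s => PySem.Str.len s) true
      = PySem.List.insertBy (fun a b => decide (PySem.Str.len b < PySem.Str.len a)) x
          (PySem.List.sorted xs (fun s => PySem.Str.len s) true) := by
  rw [PySem.List.sorted_rev_eq_foldl_insertBy, PySem.List.sorted_rev_eq_foldl_insertBy,
    List.foldl_append]
  rfl

-- filter commutes with the stable descending sort
theorem pv_filter_sorted (P : String → Bool) (xs : List String) :
    (PySem.List.sorted xs (fun s => PySem.Str.len s) true).filter P
      = PySem.List.sorted (xs.filter P) (fun s => PySem.Str.len s) true := by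
  induction xs using List.reverseRecOn with
  | nil => rfl
  | append_singleton xs x ih =>
    rw [pv_sorted_append_singleton,
      pv_filter_insertBy P x _ (PySem.List.sorted_pairwise_rev xs (fun s => PySem.Str.len s)),
      ih, List.filter_append]
    cases hP : P x with
    | true => simp only [List.filter, hP, if_true, pv_sorted_append_singleton]
    | false => simp [List.filter, hP]

-- the running strict-max fold equals the head of the stable descending sort
theorem pv_head_fold (cands : List String) :
    cands.foldl (fun b j => if PySem.Str.len j > PySem.Str.len b then j else b) ""
      = ((PySem.List.sorted cands (fun s => PySem.Str.len s) true).head?).getD "" := by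
  induction cands using List.reverseRecOn with
  | nil => rfl
  | append_singleton cands x ih =>
    rw [List.foldl_append, pv_sorted_append_singleton]
    cases hs : PySem.List.sorted cands (fun s => PySem.Str.len s) true with
    | nil =>
      rw [hs] at ih
      simp only [List.foldl, ih, Option.getD_none, List.head?_nil, PySem.List.insertBy]
      by_cases hx : PySem.Str.len x > PySem.Str.len ""
      · rw [if_pos hx]; rfl
      · rw [if_neg hx]
        have hx0 : PySem.Str.len x ≤ 0 := by
          have h0 : PySem.Str.len ("" : String) = 0 := by decide
          omega
        rw [pv_eq_empty_of_len_le_zero x hx0]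
        rfl
    | cons h t =>
      rw [hs] at ih
      simp only [List.foldl, ih, List.head?_cons, Option.getD_some, PySem.List.insertBy]
      by_cases hb : PySem.Str.len h < PySem.Str.len x
      · rw [if_pos (decide_eq_true hb), if_pos hb]
        rfl
      · rw [if_neg (by simpa using hb),
          if_neg (show ¬ (decide (PySem.Str.len h < PySem.Str.len x) = true) from by
            simp only [decide_eq_true_eq]; exact hb)]
        rfl

theorem pv_set_build (xs : List String) :
    xs.foldl (fun s i => PySem.Set.add s i) PySem.Set.empty = PySem.Set.ofList xs := rfl

-- ===== VERDICT (by name: the statement is the Claim_ definition above) =====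
theorem longestPD_spec : Claim_equal_longestPD := by
  intro input_str _
  unfold Spec_longestPD longestPD longestPD_alt
  simp only [pv_set_build]
  have hfold :
      List.foldl
        (fun best_res j =>
          if (PySem.Set.ofList input_str).contains (PySem.Str.slice j none (some (-1))) = true then
            if PySem.Str.len j > PySem.Str.len best_res then j else best_res
          else best_res) "" input_str
        = List.foldl (fun b j => if PySem.Str.len j > PySem.Str.len b then j else b) ""
            (List.filter
              (fun j => (PySem.Set.ofList input_str).contains (PySem.Str.slice j none (some (-1))))
              input_str) := by
    rw [List.foldl_filter]
  refine hfold.trans ?_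
  rw [pv_head_fold, ← pv_filter_sorted, List.head?_filter]
  cases (PySem.List.sorted input_str (fun s => PySem.Str.len s) true).find?
      (fun j => PySem.Set.contains (PySem.Set.ofList input_str) (PySem.Str.slice j none (some (-1)))) <;> rfl
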